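-- pv_equiv track=rewrite | github.com/1391819/QA-training | day-13/PYnative-exercises.py | arrange_string
-- ===== SOURCE A (Python) =====
-- def arrange_string(s):
--     # can also be done without using lists
--     tmp_lower = []
--     tmp_upper = []
--     other_stuff = []
--
--     # going through each char
--     for char in s:
--         if char.islower():
--             tmp_lower.append(char)
--         elif char.isupper():
--             tmp_upper.append(char)
--         else:
--             other_stuff.append(char)
--
--     # join lists
--     final_string = "".join(tmp_lower + tmp_upper + other_stuff)
--
--     return final_string
-- ===== SOURCE B (Python) =====
-- def arrange_string(s):
--     # one stable sort by category key instead of three explicit buckets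
--     return "".join(sorted(s, key=lambda c: 0 if c.islower() else 1 if c.isupper() else 2))
-- ===== Notes on version B (the rewrite author's own statement) =====
-- stated objective: idiomatic
-- what changed: Replaced the explicit three-bucket partition (three accumulator lists joined at the end) with a single stable sort keyed by character category (0 lower, 1 upper, 2 other).
import Mathlib
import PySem

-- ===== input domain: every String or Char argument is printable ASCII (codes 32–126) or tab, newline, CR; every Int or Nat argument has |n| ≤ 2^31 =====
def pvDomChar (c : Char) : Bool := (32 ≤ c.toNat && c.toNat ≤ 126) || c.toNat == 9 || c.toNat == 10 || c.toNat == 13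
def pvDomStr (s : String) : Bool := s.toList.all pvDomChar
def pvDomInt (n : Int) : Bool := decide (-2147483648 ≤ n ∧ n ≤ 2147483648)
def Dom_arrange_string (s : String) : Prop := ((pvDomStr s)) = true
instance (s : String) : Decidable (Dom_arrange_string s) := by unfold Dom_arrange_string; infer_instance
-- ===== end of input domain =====

-- B replaces A's explicit three-bucket partition by one stable sort keyed by character category (same result, idiomatic one-liner).


-- ===== PORT A =====
-- A: one pass over the characters, appending each to one of three lists, then join lower ++ upper ++ other.
def arrange_string (s : String) : String :=
  let st := s.toList.foldl
    (fun (acc : List Char × List Char × List Char) c =>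
      if PySem.Chars.islower c then (acc.1 ++ [c], acc.2.1, acc.2.2)
      else if PySem.Chars.isupper c then (acc.1, acc.2.1 ++ [c], acc.2.2)
      else (acc.1, acc.2.1, acc.2.2 ++ [c]))
    ([], [], [])
  String.mk (st.1 ++ st.2.1 ++ st.2.2)

-- ===== PORT B =====
-- B: ''.join(sorted(s, key=lambda c: 0 if c.islower() else 1 if c.isupper() else 2)) — stable sort by category key.
def pvKey (c : Char) : Int :=
  if PySem.Chars.islower c then 0 else if PySem.Chars.isupper c then 1 else 2

def arrange_string_alt (s : String) : String :=
  String.mk (PySem.List.sorted s.toList pvKey false)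

-- ===== PRECONDITION & SPEC =====
def Spec_arrange_string (s : String) (out : String) : Prop := out = arrange_string_alt s
instance (s : String) (out : String) : Decidable (Spec_arrange_string s out) := by unfold Spec_arrange_string; infer_instance

-- ===== CLAIM (what is proved, stated in full; the proofs are below) =====
def Claim_equal_arrange_string : Prop := ∀ (s : String), Dom_arrange_string s → Spec_arrange_string s (arrange_string s)

-- ===== LEMMAS AND PROOFS =====

-- the three category predicates, in A's branch order
def pvP0 (c : Char) : Bool := PySem.Chars.islower c
def pvP1 (c : Char) : Bool := !PySem.Chars.islower c && PySem.Chars.isupper c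
def pvP2 (c : Char) : Bool := !PySem.Chars.islower c && !PySem.Chars.isupper c

-- inserting x before the whole tail `rest` when no element of `a` comes after x and rest's head (if any) does
theorem insertBy_append_mid {α : Type} (bef : α → α → Bool) (x : α) (a rest : List α)
    (ha : ∀ y ∈ a, bef x y = false)
    (hr : rest = [] ∨ ∃ z t, rest = z :: t ∧ bef x z = true) :
    PySem.List.insertBy bef x (a ++ rest) = a ++ x :: rest := by
  induction a with
  | nil =>
    rcases hr with h | ⟨z, t, hzt, hz⟩
    · subst h; simp [PySem.List.insertBy]
    · subst hzt; simp [PySem.List.insertBy, hz]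
  | cons y a' ih =>
    have hy : bef x y = false := ha y (by simp)
    simp only [List.cons_append, PySem.List.insertBy, hy]
    simp [ih (fun z hz => ha z (by simp [hz]))]

-- the insertion-sort invariant: an accumulator grouped as a++b++c (keys 0/1/2) stays grouped,
-- each new element landing at the end of its group
theorem foldl_insertBy_grouped (xs a b c : List Char)
    (ha : ∀ y ∈ a, pvKey y = 0) (hb : ∀ y ∈ b, pvKey y = 1) (hc : ∀ y ∈ c, pvKey y = 2) :
    xs.foldl (fun acc x => PySem.List.insertBy (fun u v => decide (pvKey u < pvKey v)) x acc) (a ++ b ++ c)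
      = (a ++ xs.filter pvP0) ++ (b ++ xs.filter pvP1) ++ (c ++ xs.filter pvP2) := by
  induction xs generalizing a b c with
  | nil => simp
  | cons x xs ih =>
    simp only [List.foldl_cons]
    by_cases h0 : PySem.Chars.islower x
    · have hkx : pvKey x = 0 := by simp [pvKey, h0]
      have : PySem.List.insertBy (fun u v => decide (pvKey u < pvKey v)) x (a ++ b ++ c)
          = (a ++ [x]) ++ b ++ c := by
        rw [List.append_assoc, List.append_assoc, List.append_assoc]
        rw [insertBy_append_mid _ x a (b ++ c)
          (by intro y hy; simp [hkx, ha y hy])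
          (by cases b with
              | nil => cases c with
                | nil => left; rfl
                | cons z t => right; exact ⟨z, t, rfl, by simp [hkx, hc z (by simp)]⟩
              | cons z t => right; exact ⟨z, t ++ c, rfl, by simp [hkx, hb z (by simp)]⟩)]
        simp
      rw [this, ih (a ++ [x]) b c
        (by intro y hy; rcases List.mem_append.mp hy with h | h
            · exact ha y h
            · simp at h; subst h; exact hkx) hb hc]
      simp [pvP0, pvP1, pvP2, h0]
    · by_cases h1 : PySem.Chars.isupper x
      · have hkx : pvKey x = 1 := by simp [pvKey, h0, h1]
        have : PySem.List.insertBy (fun u v => decide (pvKey u < pvKey v)) x (a ++ b ++ c)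
            = a ++ (b ++ [x]) ++ c := by
          rw [List.append_assoc, ← List.append_assoc a b c, ← List.append_assoc]
          rw [insertBy_append_mid _ x (a ++ b) c
            (by intro y hy; rcases List.mem_append.mp hy with h | h
                · simp [hkx, ha y h]
                · simp [hkx, hb y h])
            (by cases c with
                | nil => left; rfl
                | cons z t => right; exact ⟨z, t, rfl, by simp [hkx, hc z (by simp)]⟩)]
          simp
        rw [this, ih a (b ++ [x]) c ha
          (by intro y hy; rcases List.mem_append.mp hy with h | h
              · exact hb y h
              · simp at h; subst h; exact hkx) hc]
        simp [pvP0, pvP1, pvP2, h0, h1]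
      · have hkx : pvKey x = 2 := by simp [pvKey, h0, h1]
        have : PySem.List.insertBy (fun u v => decide (pvKey u < pvKey v)) x (a ++ b ++ c)
            = a ++ b ++ (c ++ [x]) := by
          rw [PySem.List.insertBy_of_forall_not_before]
          · simp
          · intro y hy
            rcases List.mem_append.mp hy with h | h
            · rcases List.mem_append.mp h with h' | h'
              · have := ha y h'; simp [hkx, this]
              · have := hb y h'; simp [hkx, this]
            · have := hc y h; simp [hkx, this]
        rw [this, ih a b (c ++ [x]) ha hb
          (by intro y hy; rcases List.mem_append.mp hy with h | h
              · exact hc y h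
              · simp at h; subst h; exact hkx)]
        simp [pvP0, pvP1, pvP2, h0, h1]

-- B's stable sort is the concatenation of the three category filters
theorem sorted_key_eq_filters (xs : List Char) :
    PySem.List.sorted xs pvKey false = xs.filter pvP0 ++ xs.filter pvP1 ++ xs.filter pvP2 := by
  have := foldl_insertBy_grouped xs [] [] [] (by simp) (by simp) (by simp)
  simpa [PySem.List.sorted] using this

-- A's three-bucket fold computes exactly the three category filters
theorem foldA_eq_filters (xs : List Char) (l u o : List Char) :
    xs.foldl
      (fun (acc : List Char × List Char × List Char) c =>
        if PySem.Chars.islower c then (acc.1 ++ [c], acc.2.1, acc.2.2)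
        else if PySem.Chars.isupper c then (acc.1, acc.2.1 ++ [c], acc.2.2)
        else (acc.1, acc.2.1, acc.2.2 ++ [c]))
      (l, u, o)
      = (l ++ xs.filter pvP0, u ++ xs.filter pvP1, o ++ xs.filter pvP2) := by
  induction xs generalizing l u o with
  | nil => simp
  | cons x xs ih =>
    by_cases h0 : PySem.Chars.islower x
    · simp [h0, ih, pvP0, pvP1, pvP2]
    · by_cases h1 : PySem.Chars.isupper x
      · simp [h0, h1, ih, pvP0, pvP1, pvP2]
      · simp [h0, h1, ih, pvP0, pvP1, pvP2]

-- ===== VERDICT (by name: the statement is the Claim_ definition above) =====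
theorem arrange_string_spec : Claim_equal_arrange_string := by
  intro s _
  unfold Spec_arrange_string arrange_string arrange_string_alt
  rw [sorted_key_eq_filters, foldA_eq_filters]
  simp
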